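-- pv_equiv track=rewrite | github.com/Zion-support/zion-support.github.io | fix_parsing_errors.py | fix_duplicate_export_default
-- ===== SOURCE A (Python) =====
-- def fix_duplicate_export_default(content):
--     """Fix duplicate export default statements."""
--     lines = content.split('\n')
--     fixed_lines = []
--     found_export_default = False
--
--     for line in lines:
--         if 'export default function' in line and found_export_default:
--             # Skip duplicate export default
--             continue
--         elif 'export default function' in line:
--             found_export_default = True
--             fixed_lines.append(line)
--         else:
--             fixed_lines.append(line)
--
--     return '\n'.join(fixed_lines)
-- ===== SOURCE B (Python) =====
-- def fix_duplicate_export_default(content):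
--     """Fix duplicate export default statements."""
--     marker = 'export default function'
--     pos = content.find(marker)
--     if pos == -1:
--         return content
--     cut = content.find('\n', pos)
--     if cut == -1:
--         return content
--     tail = [l for l in content[cut + 1:].split('\n') if marker not in l]
--     return '\n'.join([content[:cut]] + tail)
-- ===== Notes on version B (the rewrite author's own statement) =====
-- stated objective: alternative
-- what changed: B works on the raw string instead of per-line state: it locates the first marker occurrence with str.find, finds the end of that line with a second find, keeps the whole prefix up to there verbatim (no split, no per-line test), and only splits and filters the lines after it; when no marker or no newline after it exists the input is returned unchanged without any split/join.
import Mathlib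
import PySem

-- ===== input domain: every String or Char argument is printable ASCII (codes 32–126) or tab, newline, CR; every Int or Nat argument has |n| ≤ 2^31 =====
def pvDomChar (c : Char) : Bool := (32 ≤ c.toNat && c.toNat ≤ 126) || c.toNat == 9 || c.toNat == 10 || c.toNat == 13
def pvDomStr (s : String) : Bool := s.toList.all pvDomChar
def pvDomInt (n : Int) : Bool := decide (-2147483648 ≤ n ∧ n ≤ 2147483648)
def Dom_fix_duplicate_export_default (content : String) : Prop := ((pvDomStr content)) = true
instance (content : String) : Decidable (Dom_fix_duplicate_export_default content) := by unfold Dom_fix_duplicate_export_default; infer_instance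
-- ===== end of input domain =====

-- B works on the raw string instead of A's flagged line-by-line pass: it locates the first
-- marker occurrence and the end of its line with two substring searches, keeps that prefix
-- verbatim, and only splits/filters the tail; same return value (alternative algorithm).

-- ===== PORT A =====
def pvMarker : List Char := "export default function".toList

def pvStepA (st : List (List Char) × Bool) (line : List Char) : List (List Char) × Bool :=
  if PySem.Chars.isIn pvMarker line && st.2 then st
  else if PySem.Chars.isIn pvMarker line then (st.1 ++ [line], true)
  else (st.1 ++ [line], st.2)

def fix_duplicate_export_default (content : String) : String :=
  let lines := PySem.Chars.splitOn content.toList "\n".toList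
  let res := lines.foldl pvStepA ([], false)
  String.ofList (PySem.Chars.join "\n".toList res.1)

-- ===== PORT B =====
def fix_duplicate_export_default_alt (content : String) : String :=
  let cs := content.toList
  let pos := PySem.Chars.find cs pvMarker
  if pos = -1 then content
  else
    let cut := PySem.Chars.findFrom cs "\n".toList pos
    if cut = -1 then content
    else
      let tail := (PySem.Chars.splitOn (PySem.Chars.slice cs (some (cut + 1)) none) "\n".toList).filter
        (fun l => !(PySem.Chars.isIn pvMarker l))
      String.ofList (PySem.Chars.join "\n".toList (PySem.Chars.slice cs none (some cut) :: tail))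

-- ===== PRECONDITION & SPEC =====
def Spec_fix_duplicate_export_default (content : String) (out : String) : Prop := out = fix_duplicate_export_default_alt content
instance (content : String) (out : String) : Decidable (Spec_fix_duplicate_export_default content out) := by unfold Spec_fix_duplicate_export_default; infer_instance

-- ===== CLAIM (what is proved, stated in full; the proofs are below) =====
def Claim_equal_fix_duplicate_export_default : Prop := ∀ (content : String), Dom_fix_duplicate_export_default content → Spec_fix_duplicate_export_default content (fix_duplicate_export_default content)

-- ===== LEMMAS AND PROOFS =====

-- Single-character split, recursively (= Python's split('\n')).
def pvSplit (c : Char) : List Char → List (List Char)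
  | [] => [[]]
  | a :: t =>
    if a = c then [] :: pvSplit c t
    else
      match pvSplit c t with
      | [] => [[a]]
      | h :: r => (a :: h) :: r

lemma pvSplit_ne_nil (c : Char) (s : List Char) : pvSplit c s ≠ [] := by
  induction s with
  | nil => simp [pvSplit]
  | cons a t ih =>
    simp only [pvSplit]
    split
    · simp
    · split
      · simp
      · simp

lemma pvGo (c : Char) (l : List Char) (fuel : Nat) (cur : List Char) (acc : List (List Char))
    (h : l.length < fuel) :
    PySem.Chars.splitOn.go [c] fuel l cur acc
      = acc.reverse ++ (pvSplit c l).modifyHead (fun x => cur.reverse ++ x) := by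
  induction fuel generalizing l cur acc with
  | zero => omega
  | succ f ihf =>
    cases l with
    | nil =>
      rw [PySem.Chars.splitOn.go]
      simp [pvSplit]
      omega
    | cons a rest =>
      rw [PySem.Chars.splitOn.go]
      simp only [List.isPrefixOf, Bool.and_true]
      by_cases hac : c = a
      · subst hac
        simp only [beq_self_eq_true, if_true]
        rw [show List.drop [c].length (c :: rest) = rest from rfl]
        rw [ihf rest [] (cur.reverse :: acc) (by simp at h; omega)]
        rcases hsp : pvSplit c rest with _ | ⟨hd, r⟩
        · exact absurd hsp (pvSplit_ne_nil c rest)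
        · rw [show pvSplit c (c :: rest) = [] :: pvSplit c rest by simp [pvSplit]]
          simp [hsp]
      · have hbeq : (c == a) = false := by simp [hac]
        have hca : ¬ (a = c) := fun h' => hac h'.symm
        simp only [hbeq, Bool.false_eq_true, if_false]
        rw [ihf rest (a :: cur) acc (by simp at h; omega)]
        rcases hsp : pvSplit c rest with _ | ⟨hd, r⟩
        · exact absurd hsp (pvSplit_ne_nil c rest)
        · rw [show pvSplit c (a :: rest) = (a :: hd) :: r by simp [pvSplit, hca, hsp]]
          simp

lemma pvSplitOn_single (c : Char) (s : List Char) :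
    PySem.Chars.splitOn s [c] = pvSplit c s := by
  rw [PySem.Chars.splitOn, pvGo c s (s.length + 1) [] [] (by omega)]
  rcases hsp : pvSplit c s with _ | ⟨hd, r⟩
  · exact absurd hsp (pvSplit_ne_nil c s)
  · simp

lemma pvSplit_not_mem' (c : Char) (s : List Char) : ∀ L ∈ pvSplit c s, c ∉ L := by
  induction s with
  | nil =>
    intro L h
    simp [pvSplit] at h
    simp [h]
  | cons a t ih =>
    intro L h
    by_cases hac : a = c
    · rw [show pvSplit c (a :: t) = [] :: pvSplit c t by simp [pvSplit, hac]] at h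
      rcases List.mem_cons.mp h with h | h
      · simp [h]
      · exact ih L h
    · rcases hsp : pvSplit c t with _ | ⟨hd, r⟩
      · exact absurd hsp (pvSplit_ne_nil c t)
      · rw [show pvSplit c (a :: t) = (a :: hd) :: r by simp [pvSplit, hac, hsp]] at h
        rcases List.mem_cons.mp h with h | h
        · subst h
          intro hmem
          rcases List.mem_cons.mp hmem with hmem | hmem
          · exact hac hmem.symm
          · exact ih hd (by rw [hsp]; exact List.mem_cons_self) hmem
        · exact ih L (by rw [hsp]; exact List.mem_cons_of_mem _ h)

lemma pvSplit_not_mem {c : Char} {s : List Char} {L : List Char} (h : L ∈ pvSplit c s) : c ∉ L :=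
  pvSplit_not_mem' c s L h

lemma pvJoin_pvSplit (c : Char) (s : List Char) :
    PySem.Chars.join [c] (pvSplit c s) = s := by
  induction s with
  | nil => simp [pvSplit, PySem.Chars.join_singleton]
  | cons a t ih =>
    by_cases hac : a = c
    · rcases hsp : pvSplit c t with _ | ⟨hd, r⟩
      · exact absurd hsp (pvSplit_ne_nil c t)
      · rw [show pvSplit c (a :: t) = [] :: hd :: r by simp [pvSplit, hac, hsp]]
        rw [PySem.Chars.join_cons_cons]
        rw [hsp] at ih
        simp [ih, hac]
    · rcases hsp : pvSplit c t with _ | ⟨hd, r⟩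
      · exact absurd hsp (pvSplit_ne_nil c t)
      · rw [show pvSplit c (a :: t) = (a :: hd) :: r by simp [pvSplit, hac, hsp]]
        rw [hsp] at ih
        cases r with
        | nil => simp [PySem.Chars.join_singleton] at ih ⊢; rw [ih]
        | cons q r' =>
          rw [PySem.Chars.join_cons_cons] at ih ⊢
          rw [← ih]
          simp

lemma pvSplit_append (c : Char) (a b : List Char) :
    pvSplit c (a ++ c :: b) = pvSplit c a ++ pvSplit c b := by
  induction a with
  | nil => simp [pvSplit]
  | cons x t ih =>
    by_cases hx : x = c
    · simp only [List.cons_append, pvSplit, if_pos hx, ih, List.cons_append]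
    · rcases hsp : pvSplit c t with _ | ⟨hd, r⟩
      · exact absurd hsp (pvSplit_ne_nil c t)
      · simp only [List.cons_append, pvSplit, if_neg hx, ih, hsp, List.cons_append]

lemma pvSplit_no_sep {c : Char} {a : List Char} (h : c ∉ a) : pvSplit c a = [a] := by
  induction a with
  | nil => rfl
  | cons x t ih =>
    have hx : ¬ (x = c) := fun hxc => h (by simp [hxc])
    have ht : c ∉ t := fun hc => h (List.mem_cons_of_mem _ hc)
    simp only [pvSplit, if_neg hx, ih ht]

lemma pvSplit_join {c : Char} {ls : List (List Char)} (hne : ls ≠ [])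
    (hfree : ∀ L ∈ ls, c ∉ L) : pvSplit c (PySem.Chars.join [c] ls) = ls := by
  induction ls with
  | nil => exact absurd rfl hne
  | cons L rest ih =>
    cases rest with
    | nil =>
      rw [PySem.Chars.join_singleton]
      exact pvSplit_no_sep (hfree L List.mem_cons_self)
    | cons q r =>
      rw [PySem.Chars.join_cons_cons]
      rw [show L ++ [c] ++ PySem.Chars.join [c] (q :: r) = L ++ c :: PySem.Chars.join [c] (q :: r) by simp]
      rw [pvSplit_append, pvSplit_no_sep (hfree L List.mem_cons_self)]
      rw [ih (by simp) (fun X hX => hfree X (List.mem_cons_of_mem _ hX))]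
      rfl

-- A prefix of u ++ c :: v not containing c is a prefix of u.
lemma pvPref {m u v : List Char} {c : Char} (h : m <+: u ++ c :: v) (hc : c ∉ m) :
    m <+: u := by
  obtain ⟨t, ht⟩ := h
  by_cases hlen : m.length ≤ u.length
  · rw [List.prefix_iff_eq_take]
    have h1 : (m ++ t).take m.length = m := by simp
    rw [ht, List.take_append_of_le_length hlen] at h1
    exact h1.symm
  · exfalso
    apply hc
    have h1 : (m ++ t)[u.length]? = some c := by rw [ht]; simp
    rw [List.getElem?_append_left (by omega)] at h1
    exact List.mem_of_getElem? h1

-- An infix of u ++ c :: v not containing c is an infix of u or of v.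
lemma pvInf {m u v : List Char} {c : Char} (h : m <:+: u ++ c :: v) (hc : c ∉ m) :
    m <:+: u ∨ m <:+: v := by
  have hIn : PySem.Chars.isIn m (u ++ c :: v) = true := (PySem.Chars.isIn_iff_infix _ _).mpr h
  obtain ⟨j, hj⟩ := (PySem.Chars.exists_prefix_drop_iff_isIn m _).mpr hIn
  by_cases hj' : j ≤ u.length
  · left
    rw [List.drop_append_of_le_length hj'] at hj
    exact ((pvPref hj hc).isInfix).trans (List.drop_suffix _ _).isInfix
  · right
    rw [show u ++ c :: v = (u ++ [c]) ++ v by simp,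
      show j = (u ++ [c]).length + (j - u.length - 1) by simp; omega,
      List.drop_length_add_append] at hj
    exact (hj.isInfix).trans (List.drop_suffix _ _).isInfix

-- Uniqueness characterisation of find.
lemma pvFindEq {s m : List Char} {k : Nat} (h1 : m <+: s.drop k)
    (h2 : ∀ i < k, ¬ m <+: s.drop i) : PySem.Chars.find s m = k := by
  have hinf : m <:+: s := (h1.isInfix).trans (List.drop_suffix _ _).isInfix
  have h0 : 0 ≤ PySem.Chars.find s m := (PySem.Chars.find_nonneg_iff _ _).mpr hinf
  obtain ⟨hpre, hmin⟩ := PySem.Chars.find_spec h0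
  rcases lt_trichotomy (PySem.Chars.find s m).toNat k with hlt | heq | hgt
  · exact absurd hpre (h2 _ hlt)
  · omega
  · exact absurd h1 (hmin k hgt)

lemma pvFindSingle {c : Char} {u : List Char} (v : List Char) (h : c ∉ u) :
    PySem.Chars.find (u ++ c :: v) [c] = u.length := by
  apply pvFindEq
  · rw [List.drop_append_of_le_length (le_refl _)]
    simp
  · intro i hi hpre
    rw [List.drop_append_of_le_length (le_of_lt hi)] at hpre
    rcases hd : u.drop i with _ | ⟨x, rest⟩
    · have : u.length - i = 0 := by rw [← List.length_drop, hd]; rfl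
      omega
    · rw [hd] at hpre
      simp only [List.cons_append] at hpre
      rcases List.cons_prefix_cons.mp hpre with ⟨hcx, -⟩
      exact h (hcx ▸ List.mem_of_mem_drop (hd ▸ List.mem_cons_self))

lemma pvFindNone {c : Char} {s : List Char} (h : c ∉ s) :
    PySem.Chars.find s [c] = -1 := by
  rw [PySem.Chars.find_eq_neg_one_iff]
  intro hinf
  exact h (hinf.subset (List.mem_singleton_self c))

lemma pvFindAppendLeft {L m : List Char} (r : List Char) (h : 0 ≤ PySem.Chars.find L m) :
    PySem.Chars.find (L ++ r) m = PySem.Chars.find L m := by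
  have hkL : (PySem.Chars.find L m).toNat ≤ L.length := by
    have := PySem.Chars.find_le_length L m
    omega
  have hk : PySem.Chars.find L m = ((PySem.Chars.find L m).toNat : Int) :=
    (Int.toNat_of_nonneg h).symm
  obtain ⟨hpre, hmin⟩ := PySem.Chars.find_spec h
  rw [hk]
  apply pvFindEq
  · rw [List.drop_append_of_le_length hkL]
    exact hpre.trans (List.prefix_append _ _)
  · intro i hi hpre'
    rw [List.drop_append_of_le_length (by omega)] at hpre'
    have hml : m.length ≤ (L.drop (PySem.Chars.find L m).toNat).length := hpre.length_le
    rw [List.length_drop] at hml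
    have hpre'' : m <+: L.drop i := by
      rw [List.prefix_iff_eq_take]
      rw [List.prefix_iff_eq_take, List.take_append_of_le_length (by simp; omega)] at hpre'
      exact hpre'
    exact hmin i hi hpre''

lemma pvFindShift {L m v : List Char} {c : Char} (hc : c ∉ m) (hL : ¬ m <:+: L)
    (h : 0 ≤ PySem.Chars.find v m) :
    PySem.Chars.find (L ++ c :: v) m = L.length + 1 + PySem.Chars.find v m := by
  have hk : PySem.Chars.find v m = ((PySem.Chars.find v m).toNat : Int) :=
    (Int.toNat_of_nonneg h).symm
  obtain ⟨hpre, hmin⟩ := PySem.Chars.find_spec h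
  have hgoal : PySem.Chars.find (L ++ c :: v) m
      = ((L.length + 1 + (PySem.Chars.find v m).toNat : Nat) : Int) := by
    apply pvFindEq
    · rw [show L ++ c :: v = (L ++ [c]) ++ v by simp,
        show L.length + 1 + (PySem.Chars.find v m).toNat
          = (L ++ [c]).length + (PySem.Chars.find v m).toNat by simp,
        List.drop_length_add_append]
      exact hpre
    · intro i hi hpre'
      by_cases hiL : i ≤ L.length
      · rw [List.drop_append_of_le_length hiL] at hpre'
        exact hL (((pvPref hpre' hc).isInfix).trans (List.drop_suffix _ _).isInfix)
      · rw [show L ++ c :: v = (L ++ [c]) ++ v by simp,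
          show i = (L ++ [c]).length + (i - L.length - 1) by simp; omega,
          List.drop_length_add_append] at hpre'
        exact hmin _ (by omega) hpre'
  rw [hgoal]
  rw [hk]
  push_cast
  simp

-- A member of ls is an infix of join [c] ls.
lemma pvMemInfixJoin {c : Char} {ls : List (List Char)} {L : List Char} (h : L ∈ ls) :
    L <:+: PySem.Chars.join [c] ls := by
  induction ls with
  | nil => simp at h
  | cons l rest ih =>
    rcases List.mem_cons.mp h with hL | hL
    · subst hL
      cases rest with
      | nil => rw [PySem.Chars.join_singleton]
      | cons q r =>
        rw [PySem.Chars.join_cons_cons, List.append_assoc]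
        exact (List.prefix_append _ _).isInfix
    · cases rest with
      | nil => simp at hL
      | cons q r =>
        rw [PySem.Chars.join_cons_cons]
        exact (ih hL).trans ⟨l ++ [c], [], by simp⟩

-- What A computes, line-level.
def pvSpec : List (List Char) → List (List Char)
  | [] => []
  | l :: rest =>
    if PySem.Chars.isIn pvMarker l then l :: rest.filter (fun x => !(PySem.Chars.isIn pvMarker x))
    else l :: pvSpec rest

lemma pvSpec_cons (l : List Char) (rest : List (List Char)) :
    pvSpec (l :: rest)
      = if PySem.Chars.isIn pvMarker l = true
        then l :: rest.filter (fun x => !(PySem.Chars.isIn pvMarker x))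
        else l :: pvSpec rest := rfl

lemma pvSpec_ne_nil {ls : List (List Char)} (h : ls ≠ []) : pvSpec ls ≠ [] := by
  cases ls with
  | nil => exact absurd rfl h
  | cons l rest =>
    simp only [pvSpec]
    split <;> simp

lemma pvSpec_no_marker {ls : List (List Char)} (h : ∀ L ∈ ls, ¬ pvMarker <:+: L) :
    pvSpec ls = ls := by
  induction ls with
  | nil => rfl
  | cons l rest ih =>
    have hl : PySem.Chars.isIn pvMarker l = false :=
      (PySem.Chars.isIn_eq_false_iff _ _).mpr (h l List.mem_cons_self)
    simp only [pvSpec, hl, Bool.false_eq_true, if_false]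
    rw [ih (fun L hL => h L (List.mem_cons_of_mem _ hL))]

lemma pvFoldA_true (ls : List (List Char)) (acc : List (List Char)) :
    (ls.foldl pvStepA (acc, true)).1 = acc ++ ls.filter (fun l => !(PySem.Chars.isIn pvMarker l)) := by
  induction ls generalizing acc with
  | nil => simp
  | cons l rest ih =>
    by_cases h : PySem.Chars.isIn pvMarker l = true
    · simp [pvStepA, h, ih]
    · simp only [Bool.not_eq_true] at h
      simp [pvStepA, h, ih, List.append_assoc]

lemma pvFoldA_spec (ls : List (List Char)) (acc : List (List Char)) :
    (ls.foldl pvStepA (acc, false)).1 = acc ++ pvSpec ls := by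
  induction ls generalizing acc with
  | nil => simp [pvSpec]
  | cons l rest ih =>
    by_cases h : PySem.Chars.isIn pvMarker l = true
    · simp only [List.foldl_cons, pvStepA, h]
      simp [pvSpec, h, pvFoldA_true, List.append_assoc]
    · simp only [Bool.not_eq_true] at h
      simp only [List.foldl_cons, pvStepA, h]
      simp only [pvSpec, h]
      simpa [List.append_assoc] using ih (acc ++ [l])

-- B's body, list-level.
def pvBcore (cs : List Char) : List Char :=
  let pos := PySem.Chars.find cs pvMarker
  if pos = -1 then cs
  else
    let cut := PySem.Chars.findFrom cs ['\n'] pos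
    if cut = -1 then cs
    else
      PySem.Chars.join ['\n']
        (PySem.Chars.slice cs none (some cut) ::
          (PySem.Chars.splitOn (PySem.Chars.slice cs (some (cut + 1)) none) ['\n']).filter
            (fun l => !(PySem.Chars.isIn pvMarker l)))

lemma pvAlt_eq (content : String) :
    fix_duplicate_export_default_alt content = String.ofList (pvBcore content.toList) := by
  unfold fix_duplicate_export_default_alt pvBcore
  simp only [show ("\n".toList : List Char) = ['\n'] from rfl]
  split_ifs <;> first | rfl | exact String.ofList_toList.symm

-- pvBcore with its lets inlined.
lemma pvBcore_eq (cs : List Char) :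
    pvBcore cs =
      if PySem.Chars.find cs pvMarker = -1 then cs
      else if PySem.Chars.findFrom cs ['\n'] (PySem.Chars.find cs pvMarker) = -1 then cs
      else PySem.Chars.join ['\n']
        (PySem.Chars.slice cs none
            (some (PySem.Chars.findFrom cs ['\n'] (PySem.Chars.find cs pvMarker))) ::
          (PySem.Chars.splitOn
              (PySem.Chars.slice cs
                (some (PySem.Chars.findFrom cs ['\n'] (PySem.Chars.find cs pvMarker) + 1)) none)
              ['\n']).filter (fun l => !(PySem.Chars.isIn pvMarker l))) := rfl

lemma pvJoin_cons_ne_nil {c : Char} (x : List Char) {rest : List (List Char)} (h : rest ≠ []) :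
    PySem.Chars.join [c] (x :: rest) = x ++ c :: PySem.Chars.join [c] rest := by
  cases rest with
  | nil => exact absurd rfl h
  | cons q r => rw [PySem.Chars.join_cons_cons]; simp

lemma pvJoin_head_append (L x : List Char) (K : List (List Char)) :
    PySem.Chars.join ['\n'] ((L ++ '\n' :: x) :: K)
      = L ++ '\n' :: PySem.Chars.join ['\n'] (x :: K) := by
  cases K with
  | nil => rw [PySem.Chars.join_singleton, PySem.Chars.join_singleton]
  | cons a b =>
    rw [PySem.Chars.join_cons_cons, PySem.Chars.join_cons_cons]
    simp

-- Main induction: B's raw-string computation equals A's line spec, joined.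
lemma pvMain (ls : List (List Char)) (hne : ls ≠ []) (hfree : ∀ L ∈ ls, '\n' ∉ L) :
    pvBcore (PySem.Chars.join ['\n'] ls) = PySem.Chars.join ['\n'] (pvSpec ls) := by
  have hmn : '\n' ∉ pvMarker := by decide
  induction ls with
  | nil => exact absurd rfl hne
  | cons L rest ih =>
    have hLfree : '\n' ∉ L := hfree L List.mem_cons_self
    cases rest with
    | nil =>
      rw [PySem.Chars.join_singleton]
      have hspec : pvSpec [L] = [L] := by rw [pvSpec_cons]; split <;> simp [pvSpec]
      rw [hspec, PySem.Chars.join_singleton, pvBcore_eq]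
      by_cases hpos : PySem.Chars.find L pvMarker = -1
      · rw [if_pos hpos]
      · have h0 : 0 ≤ PySem.Chars.find L pvMarker := by
          have := PySem.Chars.neg_one_le_find L pvMarker; omega
        have hple : (PySem.Chars.find L pvMarker).toNat ≤ L.length := by
          have := PySem.Chars.find_le_length L pvMarker; omega
        have hcut : PySem.Chars.findFrom L ['\n'] (PySem.Chars.find L pvMarker) = -1 := by
          rw [show PySem.Chars.find L pvMarker = ((PySem.Chars.find L pvMarker).toNat : Int) by omega]
          rw [PySem.Chars.findFrom_natCast L ['\n'] _ hple]
          rw [pvFindNone (fun hm => hLfree (List.mem_of_mem_drop hm))]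
          simp
        rw [if_neg hpos, if_pos hcut]
    | cons q r =>
      have hrne : (q :: r) ≠ [] := by simp
      have hrfree : ∀ X ∈ q :: r, '\n' ∉ X := fun X hX => hfree X (List.mem_cons_of_mem _ hX)
      have hIH := ih hrne hrfree
      set j := PySem.Chars.join ['\n'] (q :: r) with hj
      have hcs : PySem.Chars.join ['\n'] (L :: q :: r) = L ++ '\n' :: j := by
        rw [PySem.Chars.join_cons_cons, ← hj]; simp
      rw [hcs]
      by_cases hmL : PySem.Chars.isIn pvMarker L = true
      · -- the first line carries the marker
        have hinfL : pvMarker <:+: L := (PySem.Chars.isIn_iff_infix _ _).mp hmL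
        have h0L : 0 ≤ PySem.Chars.find L pvMarker := (PySem.Chars.find_nonneg_iff _ _).mpr hinfL
        have hfind : PySem.Chars.find (L ++ '\n' :: j) pvMarker = PySem.Chars.find L pvMarker :=
          pvFindAppendLeft _ h0L
        have hpos : ¬ PySem.Chars.find (L ++ '\n' :: j) pvMarker = -1 := by omega
        have hple : (PySem.Chars.find L pvMarker).toNat ≤ L.length := by
          have := PySem.Chars.find_le_length L pvMarker; omega
        have hplecs : (PySem.Chars.find L pvMarker).toNat ≤ (L ++ '\n' :: j).length := by
          simp; omega
        have hcut : PySem.Chars.findFrom (L ++ '\n' :: j) ['\n']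
            (PySem.Chars.find (L ++ '\n' :: j) pvMarker) = (L.length : Int) := by
          rw [hfind, show PySem.Chars.find L pvMarker
                = ((PySem.Chars.find L pvMarker).toNat : Int) by omega]
          rw [PySem.Chars.findFrom_natCast _ ['\n'] _ hplecs]
          rw [List.drop_append_of_le_length hple]
          rw [pvFindSingle j (fun hm => hLfree (List.mem_of_mem_drop hm))]
          rw [if_neg (by omega)]
          simp [List.length_drop]
          omega
        rw [pvBcore_eq, if_neg hpos, hcut, if_neg (by omega : ¬ (L.length : Int) = -1)]
        have hslice1 : PySem.Chars.slice (L ++ '\n' :: j) none (some (L.length : Int))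
            = L := by
          rw [PySem.Chars.slice_eq_listSlice, PySem.List.slice_to _ (by omega)]
          simp
        have hslice2 : PySem.Chars.slice (L ++ '\n' :: j) (some ((L.length : Int) + 1)) none
            = j := by
          rw [PySem.Chars.slice_eq_listSlice, PySem.List.slice_from _ (by omega)]
          rw [show ((L.length : Int) + 1).toNat = L.length + 1 by omega]
          rw [show L ++ '\n' :: j = (L ++ ['\n']) ++ j by simp]
          rw [show L.length + 1 = (L ++ ['\n']).length + 0 by simp]
          rw [List.drop_length_add_append]
          simp
        rw [hslice1, hslice2, pvSplitOn_single, pvSplit_join hrne hrfree]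
        rw [pvSpec_cons, if_pos hmL]
      · -- the first line is marker-free
        have hmLf : PySem.Chars.isIn pvMarker L = false := by
          simpa using hmL
        have hnmL : ¬ pvMarker <:+: L := (PySem.Chars.isIn_eq_false_iff _ _).mp hmLf
        have hspec : pvSpec (L :: q :: r) = L :: pvSpec (q :: r) := by
          rw [pvSpec_cons, if_neg (by simp [hmLf])]
        rw [hspec]
        have hspecne : pvSpec (q :: r) ≠ [] := pvSpec_ne_nil hrne
        rw [pvJoin_cons_ne_nil L hspecne]
        by_cases hpos : PySem.Chars.find (L ++ '\n' :: j) pvMarker = -1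
        · -- no marker anywhere
          have hnm : ¬ pvMarker <:+: (L ++ '\n' :: j) :=
            (PySem.Chars.find_eq_neg_one_iff _ _).mp hpos
          have hnone : ∀ X ∈ q :: r, ¬ pvMarker <:+: X := by
            intro X hX hinf
            exact hnm (hinf.trans (by rw [← hcs]; exact pvMemInfixJoin (List.mem_cons_of_mem _ hX)))
          rw [pvSpec_no_marker hnone, pvBcore_eq, if_pos hpos]
        · have h0 : 0 ≤ PySem.Chars.find (L ++ '\n' :: j) pvMarker := by
            have := PySem.Chars.neg_one_le_find (L ++ '\n' :: j) pvMarker; omega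
          have hinfcs : pvMarker <:+: (L ++ '\n' :: j) :=
            (PySem.Chars.find_nonneg_iff _ _).mp h0
          have hinfj : pvMarker <:+: j := by
            rcases pvInf hinfcs hmn with h | h
            · exact absurd h hnmL
            · exact h
          have h0j : 0 ≤ PySem.Chars.find j pvMarker := (PySem.Chars.find_nonneg_iff _ _).mpr hinfj
          have hposj : ¬ PySem.Chars.find j pvMarker = -1 := by omega
          have hfind : PySem.Chars.find (L ++ '\n' :: j) pvMarker
              = L.length + 1 + PySem.Chars.find j pvMarker := pvFindShift hmn hnmL h0j
          have hkle : (PySem.Chars.find j pvMarker).toNat ≤ j.length := by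
            have := PySem.Chars.find_le_length j pvMarker; omega
          have hdropcs : (L ++ '\n' :: j).drop (L.length + 1 + (PySem.Chars.find j pvMarker).toNat)
              = j.drop (PySem.Chars.find j pvMarker).toNat := by
            rw [show L ++ '\n' :: j = (L ++ ['\n']) ++ j by simp,
              show L.length + 1 + (PySem.Chars.find j pvMarker).toNat
                = (L ++ ['\n']).length + (PySem.Chars.find j pvMarker).toNat by simp]
            rw [List.drop_length_add_append]
          have hcutcs : PySem.Chars.findFrom (L ++ '\n' :: j) ['\n']
              (PySem.Chars.find (L ++ '\n' :: j) pvMarker)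
              = if PySem.Chars.find (j.drop (PySem.Chars.find j pvMarker).toNat) ['\n'] = -1
                then -1
                else (L.length : Int) + 1 + (PySem.Chars.find j pvMarker).toNat
                  + PySem.Chars.find (j.drop (PySem.Chars.find j pvMarker).toNat) ['\n'] := by
            rw [hfind, show (L.length : Int) + 1 + PySem.Chars.find j pvMarker
                  = ((L.length + 1 + (PySem.Chars.find j pvMarker).toNat : Nat) : Int) by
                push_cast; omega]
            rw [PySem.Chars.findFrom_natCast _ ['\n'] _ (by simp; omega)]
            rw [hdropcs]
            split
            · rfl
            · push_cast; ring
          have hcutj : PySem.Chars.findFrom j ['\n'] (PySem.Chars.find j pvMarker)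
              = if PySem.Chars.find (j.drop (PySem.Chars.find j pvMarker).toNat) ['\n'] = -1
                then -1
                else ((PySem.Chars.find j pvMarker).toNat : Int)
                  + PySem.Chars.find (j.drop (PySem.Chars.find j pvMarker).toNat) ['\n'] := by
            conv_lhs => rw [show PySem.Chars.find j pvMarker
                  = ((PySem.Chars.find j pvMarker).toNat : Int) from by omega]
            rw [PySem.Chars.findFrom_natCast j ['\n'] _ hkle]
          by_cases hr : PySem.Chars.find (j.drop (PySem.Chars.find j pvMarker).toNat) ['\n'] = -1
          · -- no newline after the first marker: both keep everything
            have hBj : pvBcore j = j := by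
              rw [pvBcore_eq, if_neg hposj, hcutj, if_pos hr, if_pos rfl]
            rw [pvBcore_eq, if_neg hpos, hcutcs, if_pos hr, if_pos rfl]
            rw [hBj] at hIH
            rw [← hIH]
          · have h0r : 0 ≤ PySem.Chars.find (j.drop (PySem.Chars.find j pvMarker).toNat) ['\n'] := by
              have := PySem.Chars.neg_one_le_find (j.drop (PySem.Chars.find j pvMarker).toNat) ['\n']
              omega
            set k := (PySem.Chars.find j pvMarker).toNat with hk
            set r0 := PySem.Chars.find (j.drop k) ['\n'] with hr0
            have hr0le : r0 ≤ (j.drop k).length := PySem.Chars.find_le_length _ _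
            have hkr : (k : Int) + r0 = ((k + r0.toNat : Nat) : Int) := by push_cast; omega
            have hcut2 : ¬ ((L.length : Int) + 1 + k + r0 = -1) := by omega
            have hcutj2 : ¬ ((k : Int) + r0 = -1) := by omega
            have htn1 : ((k : Int) + r0).toNat = k + r0.toNat := by omega
            have htn2 : ((k : Int) + r0 + 1).toNat = k + r0.toNat + 1 := by omega
            have hBj : pvBcore j = PySem.Chars.join ['\n']
                (j.take (k + r0.toNat) ::
                  (PySem.Chars.splitOn (j.drop (k + r0.toNat + 1)) ['\n']).filter
                    (fun l => !(PySem.Chars.isIn pvMarker l))) := by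
              rw [pvBcore_eq, if_neg hposj, hcutj, if_neg hr, if_neg hcutj2]
              rw [PySem.Chars.slice_eq_listSlice, PySem.List.slice_to _ (by omega), htn1]
              rw [PySem.Chars.slice_eq_listSlice, PySem.List.slice_from _ (by omega), htn2]
            have hBcs : pvBcore (L ++ '\n' :: j) = PySem.Chars.join ['\n']
                ((L ++ '\n' :: j.take (k + r0.toNat)) ::
                  (PySem.Chars.splitOn (j.drop (k + r0.toNat + 1)) ['\n']).filter
                    (fun l => !(PySem.Chars.isIn pvMarker l))) := by
              rw [pvBcore_eq, if_neg hpos, hcutcs, if_neg hr, if_neg hcut2]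
              congr 1
              congr 1
              · rw [PySem.Chars.slice_eq_listSlice, PySem.List.slice_to _ (by omega)]
                rw [show ((L.length : Int) + 1 + k + r0).toNat
                      = (L ++ ['\n']).length + (k + r0.toNat) by simp; omega]
                rw [show L ++ '\n' :: j = (L ++ ['\n']) ++ j by simp]
                rw [List.take_length_add_append]
                simp
              · congr 1
                rw [PySem.Chars.slice_eq_listSlice, PySem.List.slice_from _ (by omega)]
                rw [show ((L.length : Int) + 1 + k + r0 + 1).toNat
                      = (L ++ ['\n']).length + (k + r0.toNat + 1) by simp; omega]
                rw [show L ++ '\n' :: j = (L ++ ['\n']) ++ j by simp]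
                rw [List.drop_length_add_append]
            rw [hBcs, pvJoin_head_append, ← hBj, hIH]

-- ===== VERDICT (by name: the statement is the Claim_ definition above) =====
theorem fix_duplicate_export_default_spec : Claim_equal_fix_duplicate_export_default := by
  intro content _
  unfold Spec_fix_duplicate_export_default
  rw [pvAlt_eq]
  unfold fix_duplicate_export_default
  have hnl : ("\n".toList : List Char) = ['\n'] := rfl
  simp only [hnl, pvSplitOn_single, pvFoldA_spec, List.nil_append]
  congr 1
  rw [← pvJoin_pvSplit '\n' content.toList, pvMain _ (pvSplit_ne_nil _ _) (fun L hL => pvSplit_not_mem hL),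
    pvSplit_join (pvSplit_ne_nil '\n' content.toList) (fun L hL => pvSplit_not_mem hL)]
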